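-- pv_equiv track=rewrite | github.com/abragal571pps/ceti-pps5 | mychar.py | cadena_mas_larga
-- ===== SOURCE A (Python) =====
-- def cadena_mas_larga(cadenas):
--     """
--     Recibe una lista de cadenas y devuelve la más larga.
--
--     Reglas:
--     - La entrada debe ser una lista.
--     - Todos los elementos deben ser cadenas de texto.
--     - Si la lista está vacía, devuelve "".
--     - En caso de empate, devuelve la primera alfabéticamente.
--     """
--
--     # La entrada debe ser una lista
--     if not isinstance(cadenas, list):
--         raise TypeError("La entrada debe ser una lista.")
--
--     # Lista vacía
--     if len(cadenas) == 0:
--         return ""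
--
--     # Todos los elementos deben ser cadenas
--     for elemento in cadenas:
--         if not isinstance(elemento, str):
--             raise TypeError("Todos los elementos deben ser cadenas de texto.")
--
--     # Cálculo de la longitud máxima
--     longitud_maxima = max(len(cadena) for cadena in cadenas)
--
--     # Selección de las cadenas con longitud máxima
--     cadenas_maximas = [
--         cadena for cadena in cadenas if len(cadena) == longitud_maxima
--     ]
--
--     # Resolución del empate por orden alfabético
--     return sorted(cadenas_maximas)[0]
-- ===== SOURCE B (Python) =====
-- def cadena_mas_larga(cadenas):
--     """
--     Recibe una lista de cadenas y devuelve la más larga.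
--     Empates: la primera alfabéticamente. Lista vacía: "".
--     """
--     if not isinstance(cadenas, list):
--         raise TypeError("La entrada debe ser una lista.")
--     if len(cadenas) == 0:
--         return ""
--     for elemento in cadenas:
--         if not isinstance(elemento, str):
--             raise TypeError("Todos los elementos deben ser cadenas de texto.")
--     best = None
--     for c in cadenas:
--         if best is None or len(c) > len(best) or (len(c) == len(best) and c < best):
--             best = c
--     return best
-- ===== Notes on version B (the rewrite author's own statement) =====
-- stated objective: alternative
-- what changed: Replaced A's three shaped passes (max of lengths, filter to the longest strings, sort and take the first) by a single selection scan that keeps the running winner under the key (longest, then alphabetically first).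
import Mathlib
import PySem

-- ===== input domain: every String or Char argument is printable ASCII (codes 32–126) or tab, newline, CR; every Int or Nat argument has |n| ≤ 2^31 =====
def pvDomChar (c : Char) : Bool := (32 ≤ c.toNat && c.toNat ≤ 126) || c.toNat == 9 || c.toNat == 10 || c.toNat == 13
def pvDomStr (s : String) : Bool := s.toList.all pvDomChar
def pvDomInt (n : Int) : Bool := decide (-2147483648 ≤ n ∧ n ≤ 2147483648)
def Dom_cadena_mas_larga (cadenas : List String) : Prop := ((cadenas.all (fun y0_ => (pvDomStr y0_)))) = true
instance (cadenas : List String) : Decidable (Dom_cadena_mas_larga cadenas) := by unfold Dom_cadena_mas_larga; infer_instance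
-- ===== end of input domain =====

-- B replaces A's three passes (max length, filter, sort) by one selection scan keeping the running winner; same result, one pass.

-- ===== PORT A =====
def cadena_mas_larga (cadenas : List String) : String :=
  -- isinstance checks are vacuous under the type convention
  if cadenas.length = 0 then ""
  else
    let longitud_maxima := (PySem.List.max? (cadenas.map (fun c => PySem.Str.len c)) (fun x => x)).getD 0
    let cadenas_maximas := cadenas.filter (fun c => PySem.Str.len c == longitud_maxima)
    (PySem.List.pyGet? (PySem.List.sorted cadenas_maximas (fun x => x) false) 0).getD ""

-- ===== PORT B =====
def cadena_mas_larga_alt (cadenas : List String) : String :=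
  if cadenas.length = 0 then ""
  else
    (cadenas.foldl (fun best c =>
      match best with
      | none => some c
      | some b =>
          if PySem.Str.len b < PySem.Str.len c ∨ (PySem.Str.len c = PySem.Str.len b ∧ c < b)
          then some c else some b) none).getD ""

-- ===== PRECONDITION & SPEC =====
def Spec_cadena_mas_larga (cadenas : List String) (out : String) : Prop := out = cadena_mas_larga_alt cadenas
instance (cadenas : List String) (out : String) : Decidable (Spec_cadena_mas_larga cadenas out) := by unfold Spec_cadena_mas_larga; infer_instance

-- ===== CLAIM (what is proved, stated in full; the proofs are below) =====
def Claim_equal_cadena_mas_larga : Prop := ∀ (cadenas : List String), Dom_cadena_mas_larga cadenas → Spec_cadena_mas_larga cadenas (cadena_mas_larga cadenas)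

-- ===== LEMMAS AND PROOFS =====

-- "a wins-or-ties against b" under the key (-len, string): the order both programs minimise
def pvLe (a b : String) : Prop :=
  PySem.Str.len b < PySem.Str.len a ∨ (PySem.Str.len a = PySem.Str.len b ∧ a ≤ b)

theorem pvLe_refl (a : String) : pvLe a a := Or.inr ⟨rfl, le_refl _⟩

theorem pvLe_trans {a b c : String} (h1 : pvLe a b) (h2 : pvLe b c) : pvLe a c := by
  rcases h1 with h1 | ⟨h1, h1'⟩ <;> rcases h2 with h2 | ⟨h2, h2'⟩
  · exact Or.inl (lt_trans h2 h1)
  · exact Or.inl (h2 ▸ h1)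
  · exact Or.inl (h1 ▸ h2)
  · exact Or.inr ⟨h1.trans h2, le_trans h1' h2'⟩

theorem pvLe_antisymm {a b : String} (h1 : pvLe a b) (h2 : pvLe b a) : a = b := by
  rcases h1 with h1 | ⟨h1, h1'⟩ <;> rcases h2 with h2 | ⟨h2, h2'⟩
  · exact absurd h1 (not_lt_of_gt h2)
  · omega
  · omega
  · exact le_antisymm h1' h2'

-- B's step on the unwrapped accumulator
def pvStep (b c : String) : String :=
  if PySem.Str.len b < PySem.Str.len c ∨ (PySem.Str.len c = PySem.Str.len b ∧ c < b) then c else b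

theorem pvStep_le_left (b c : String) : pvLe (pvStep b c) b := by
  unfold pvStep; split
  · rename_i h; rcases h with h | ⟨h, h'⟩
    · exact Or.inl h
    · exact Or.inr ⟨h, le_of_lt h'⟩
  · exact pvLe_refl b

theorem pvStep_le_right (b c : String) : pvLe (pvStep b c) c := by
  unfold pvStep; split
  · exact pvLe_refl c
  · rename_i h
    rcases lt_trichotomy (PySem.Str.len c) (PySem.Str.len b) with hl | hl | hl
    · exact Or.inl hl
    · refine Or.inr ⟨hl.symm, ?_⟩
      by_cases hcb : c < b
      · exact absurd (Or.inr ⟨hl, hcb⟩) h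
      · exact not_lt.mp hcb
    · exact absurd (Or.inl hl) h

theorem pvStep_mem (b c : String) : pvStep b c = b ∨ pvStep b c = c := by
  unfold pvStep; split
  · exact Or.inr rfl
  · exact Or.inl rfl

-- the unwrapped fold is a minimum of b :: cs under pvLe, and a member
theorem pvFold_spec (cs : List String) (b : String) :
    (cs.foldl pvStep b ∈ b :: cs) ∧ ∀ y ∈ b :: cs, pvLe (cs.foldl pvStep b) y := by
  induction cs generalizing b with
  | nil => exact ⟨List.mem_singleton.mpr rfl, by intro y hy; simp at hy; subst hy; exact pvLe_refl _⟩
  | cons c cs ih =>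
    obtain ⟨hmem, hmin⟩ := ih (pvStep b c)
    constructor
    · simp only [List.foldl_cons]
      rcases List.mem_cons.mp hmem with he | hm
      · rcases pvStep_mem b c with h | h
        · rw [he, h]; exact List.mem_cons_self
        · rw [he, h]; exact List.mem_cons_of_mem _ (List.mem_cons_self)
      · exact List.mem_cons_of_mem _ (List.mem_cons_of_mem _ hm)
    · intro y hy
      simp only [List.foldl_cons]
      rcases List.mem_cons.mp hy with rfl | hy'
      · exact pvLe_trans (hmin _ (List.mem_cons_self)) (pvStep_le_left _ _)
      · rcases List.mem_cons.mp hy' with rfl | hy''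
        · exact pvLe_trans (hmin _ (List.mem_cons_self)) (pvStep_le_right _ _)
        · exact hmin _ (List.mem_cons_of_mem _ hy'')

-- B's option-wrapped fold equals the unwrapped fold
theorem pvFold_option (cs : List String) (b : String) :
    cs.foldl (fun best c =>
      match best with
      | none => some c
      | some b =>
          if PySem.Str.len b < PySem.Str.len c ∨ (PySem.Str.len c = PySem.Str.len b ∧ c < b)
          then some c else some b) (some b) = some (cs.foldl pvStep b) := by
  induction cs generalizing b with
  | nil => rfl
  | cons c cs ih =>
    simp only [List.foldl_cons]
    by_cases h : PySem.Str.len b < PySem.Str.len c ∨ (PySem.Str.len c = PySem.Str.len b ∧ c < b)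
    · have hs : pvStep b c = c := by unfold pvStep; rw [if_pos h]
      rw [hs]
      show List.foldl _ (if _ then some c else some b) cs = _
      rw [if_pos h, ih]
    · have hs : pvStep b c = b := by unfold pvStep; rw [if_neg h]
      rw [hs]
      show List.foldl _ (if _ then some c else some b) cs = _
      rw [if_neg h, ih]

-- A's result is also a member of the list and a pvLe-minimum
theorem pvA_spec (c : String) (cs : List String) :
    (cadena_mas_larga (c :: cs) ∈ c :: cs) ∧ ∀ y ∈ c :: cs, pvLe (cadena_mas_larga (c :: cs)) y := by
  obtain ⟨M, hM⟩ : ∃ M, PySem.List.max? ((c :: cs).map (fun s => PySem.Str.len s)) (fun x => x) = some M := by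
    cases h : PySem.List.max? ((c :: cs).map (fun s => PySem.Str.len s)) (fun x => x) with
    | none => simp [PySem.List.max?_eq_none_iff] at h
    | some M => exact ⟨M, rfl⟩
  have hA : cadena_mas_larga (c :: cs) =
      (PySem.List.pyGet? (PySem.List.sorted ((c :: cs).filter (fun s => PySem.Str.len s == M)) (fun x => x) false) 0).getD "" := by
    unfold cadena_mas_larga
    rw [if_neg (by simp)]
    rw [hM]
    rfl
  have hMmax : ∀ y ∈ c :: cs, PySem.Str.len y ≤ M := by
    intro y hy
    exact PySem.List.max?_isMax hM _ (List.mem_map.mpr ⟨y, hy, rfl⟩)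
  -- the filter is nonempty: some element attains M
  obtain ⟨x, hxl, hxM⟩ := List.mem_map.mp (PySem.List.max?_mem hM)
  have hxF : x ∈ (c :: cs).filter (fun s => PySem.Str.len s == M) :=
    List.mem_filter.mpr ⟨hxl, beq_iff_eq.mpr hxM⟩
  cases hs : PySem.List.sorted ((c :: cs).filter (fun s => PySem.Str.len s == M)) (fun x => x) false with
  | nil =>
    rw [PySem.List.sorted_eq_nil_iff] at hs
    exact absurd hs (List.ne_nil_of_mem hxF)
  | cons m t =>
    have hres : cadena_mas_larga (c :: cs) = m := by
      rw [hA, hs]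
      simp [PySem.List.pyGet?, PySem.List.pyIdx?]
    have hmF : m ∈ (c :: cs).filter (fun s => PySem.Str.len s == M) := by
      have : m ∈ PySem.List.sorted ((c :: cs).filter (fun s => PySem.Str.len s == M)) (fun x => x) false := by
        rw [hs]; exact List.mem_cons_self
      exact (PySem.List.mem_sorted _ _ _ _).mp this
    obtain ⟨hml, hmM⟩ := List.mem_filter.mp hmF
    have hmlen : PySem.Str.len m = M := beq_iff_eq.mp hmM
    rw [hres]
    refine ⟨hml, ?_⟩
    intro y hy
    rcases lt_or_eq_of_le (hMmax y hy) with hlt | heq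
    · exact Or.inl (by omega)
    · have hyF : y ∈ (c :: cs).filter (fun s => PySem.Str.len s == M) :=
        List.mem_filter.mpr ⟨hy, beq_iff_eq.mpr heq⟩
      exact Or.inr ⟨by omega, PySem.List.key_head_sorted_le _ _ hs y hyF⟩

theorem cadena_mas_larga_spec : Claim_equal_cadena_mas_larga := by
  intro cadenas _
  unfold Spec_cadena_mas_larga
  match cadenas with
  | [] => rfl
  | c :: cs =>
    obtain ⟨haM, haL⟩ := pvA_spec c cs
    obtain ⟨hbM, hbL⟩ := pvFold_spec cs c
    have hb : cadena_mas_larga_alt (c :: cs) = cs.foldl pvStep c := by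
      unfold cadena_mas_larga_alt
      simp only [List.length_cons, List.foldl_cons]
      rw [if_neg (by omega)]
      show (cs.foldl _ (some c)).getD "" = _
      rw [pvFold_option]; rfl
    rw [hb]
    exact pvLe_antisymm (haL _ hbM) (hbL _ haM)
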